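-- pv_equiv track=rewrite | github.com/Leonardojdss/RAG-new-algorithm | src/usecase/embedding_usecase.py | create_overlapping_chunks
-- ===== SOURCE A (Python) =====
-- def create_overlapping_chunks(texts, overlap_size):
--     """
--     Aplica overlap manual entre os chunks de texto.
--     Função criada para contornar o bug da função de overlap da langchain.
--
--     Args:
--         texts: Lista de strings com os chunks de texto
--         overlap_size: Tamanho do overlap em caracteres
--
--     Returns:
--         Lista de strings com os chunks com overlap aplicado
--     """
--     overlapping_texts = []
--     for i in range(len(texts)):
--         current_chunk = texts[i]
--         overlap_prefix = ''
--         overlap_suffix = ''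
--
--         if i > 0:
--             previous_chunk = texts[i-1]
--             overlap_prefix = previous_chunk[-overlap_size:]
--
--         if i < len(texts) - 1:
--             next_chunk = texts[i+1]
--             overlap_suffix = next_chunk[:overlap_size]
--
--         combined_chunk = overlap_prefix + current_chunk + overlap_suffix
--         overlapping_texts.append(combined_chunk)
--
--     return overlapping_texts
-- ===== SOURCE B (Python) =====
-- def create_overlapping_chunks(texts, overlap_size):
--     """Concatenate all chunks once, precompute an offset table, and emit each
--     overlapped chunk as a single slice of the big string (offset arithmetic
--     replaces per-neighbor string slicing)."""
--     def clamp(v, L):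
--         if v < 0:
--             v += L
--         return max(0, min(v, L))
--
--     s = ''.join(texts)
--     offs = [0]
--     for t in texts:
--         offs.append(offs[-1] + len(t))
--     n = len(texts)
--     out = []
--     for i in range(n):
--         if i > 0:
--             a = offs[i - 1] + clamp(-overlap_size, len(texts[i - 1]))
--         else:
--             a = offs[i]
--         if i < n - 1:
--             b = offs[i + 1] + clamp(overlap_size, len(texts[i + 1]))
--         else:
--             b = offs[i + 1]
--         out.append(s[a:b])
--     return out
-- ===== Notes on version B (the rewrite author's own statement) =====
-- stated objective: alternative
-- what changed: B concatenates all chunks into one big string with a precomputed offset table and emits each overlapped chunk as a single slice [a:b] of that concatenation, the bounds computed by clamp arithmetic on neighbor lengths, instead of slicing the two neighbor strings per index and concatenating three pieces.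
import Mathlib
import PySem

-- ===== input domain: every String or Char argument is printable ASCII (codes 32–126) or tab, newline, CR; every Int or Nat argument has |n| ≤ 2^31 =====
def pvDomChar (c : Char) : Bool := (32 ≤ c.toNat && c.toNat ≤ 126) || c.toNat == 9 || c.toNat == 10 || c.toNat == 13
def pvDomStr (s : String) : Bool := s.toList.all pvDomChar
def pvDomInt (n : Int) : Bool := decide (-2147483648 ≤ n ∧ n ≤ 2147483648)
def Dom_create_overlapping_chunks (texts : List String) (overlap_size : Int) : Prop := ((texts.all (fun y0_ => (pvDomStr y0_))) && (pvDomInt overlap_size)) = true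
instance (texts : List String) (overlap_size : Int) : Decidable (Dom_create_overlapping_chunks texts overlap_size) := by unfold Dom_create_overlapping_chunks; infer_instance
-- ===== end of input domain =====

-- B concatenates everything once and cuts each overlapped chunk as ONE slice of the
-- big string using an offset table and clamp arithmetic, instead of slicing the two
-- neighbor strings per index and gluing three pieces (objective: alternative).

-- ===== PORT A =====
def create_overlapping_chunks (texts : List String) (overlap_size : Int) : List String :=
  (PySem.List.pyRange 0 (texts.length : Int) 1).foldl (fun overlapping_texts i =>
    let current_chunk := PySem.List.pyGetD texts i ""
    let overlap_prefix : String := ""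
    let overlap_suffix : String := ""
    let overlap_prefix := if 0 < i then
        let previous_chunk := PySem.List.pyGetD texts (i - 1) ""
        PySem.Str.slice previous_chunk (some (-overlap_size)) none
      else overlap_prefix
    let overlap_suffix := if i < (texts.length : Int) - 1 then
        let next_chunk := PySem.List.pyGetD texts (i + 1) ""
        PySem.Str.slice next_chunk none (some overlap_size)
      else overlap_suffix
    let combined_chunk := overlap_prefix ++ current_chunk ++ overlap_suffix
    overlapping_texts ++ [combined_chunk]) []

-- ===== PORT B =====
-- Source B's local helper clamp(v, L): Python's slice-bound clamping, written out
def pvClamp (v L : Int) : Int :=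
  let v := if v < 0 then v + L else v
  max 0 (min v L)

def create_overlapping_chunks_alt (texts : List String) (overlap_size : Int) : List String :=
  let s := PySem.Str.join "" texts
  let offs := texts.foldl
    (fun offs t => offs ++ [PySem.List.pyGetD offs (-1) 0 + PySem.Str.len t]) [(0 : Int)]
  let n := (texts.length : Int)
  (PySem.List.pyRange 0 n 1).foldl (fun out i =>
    let a := if 0 < i then
        PySem.List.pyGetD offs (i - 1) 0
          + pvClamp (-overlap_size) (PySem.Str.len (PySem.List.pyGetD texts (i - 1) ""))
      else PySem.List.pyGetD offs i 0
    let b := if i < n - 1 then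
        PySem.List.pyGetD offs (i + 1) 0
          + pvClamp overlap_size (PySem.Str.len (PySem.List.pyGetD texts (i + 1) ""))
      else PySem.List.pyGetD offs (i + 1) 0
    out ++ [PySem.Str.slice s (some a) (some b)]) []

-- ===== PRECONDITION & SPEC =====
def Spec_create_overlapping_chunks (texts : List String) (overlap_size : Int) (out : List String) : Prop := out = create_overlapping_chunks_alt texts overlap_size
instance (texts : List String) (overlap_size : Int) (out : List String) : Decidable (Spec_create_overlapping_chunks texts overlap_size out) := by unfold Spec_create_overlapping_chunks; infer_instance

-- ===== CLAIM (what is proved, stated in full; the proofs are below) =====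
def Claim_equal_create_overlapping_chunks : Prop := ∀ (texts : List String) (overlap_size : Int), Dom_create_overlapping_chunks texts overlap_size → Spec_create_overlapping_chunks texts overlap_size (create_overlapping_chunks texts overlap_size)

-- ===== LEMMAS AND PROOFS =====

-- the i-th output chunk as a function of the index: both ports reduce to a map of this
def pvChunk (texts : List String) (k : Int) (i : Nat) : String :=
  (if (0:Int) < (i:Int) then
     PySem.Str.slice (PySem.List.pyGetD texts ((i:Int) - 1) "") (some (-k)) none else "") ++
    PySem.List.pyGetD texts (i:Int) "" ++
    (if (i : Int) < (texts.length : Int) - 1 then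
       PySem.Str.slice (PySem.List.pyGetD texts ((i:Int) + 1) "") none (some k) else "")

-- offsets into the flattened character list
def pvOff (L : List (List Char)) (j : Nat) : Nat := ((L.take j).flatten).length

theorem a_eq_map (texts : List String) (k : Int) :
    create_overlapping_chunks texts k = (List.range texts.length).map (pvChunk texts k) := by
  unfold create_overlapping_chunks
  rw [PySem.List.foldl_append_singleton_eq_map, PySem.List.pyRange_one]
  simp [List.map_map, Function.comp, pvChunk]

theorem join_empty_flatten : ∀ (P : List (List Char)), PySem.Chars.join [] P = P.flatten
  | [] => by simp [PySem.Chars.join_nil]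
  | [p] => by simp [PySem.Chars.join_singleton]
  | p :: q :: rest => by
      rw [PySem.Chars.join_cons_cons, join_empty_flatten (q :: rest)]; simp

theorem pvOff_zero (L : List (List Char)) : pvOff L 0 = 0 := by simp [pvOff]

theorem pvOff_succ (L : List (List Char)) (j : Nat) (hj : j < L.length) :
    pvOff L (j + 1) = pvOff L j + L[j].length := by
  have h := List.sum_take_succ (List.map List.length L) j (by simpa using hj)
  unfold pvOff
  simp only [List.length_flatten, List.map_take]
  rw [h]
  simp

theorem pvOff_cons_succ (c : List Char) (M : List (List Char)) (j : Nat) :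
    pvOff (c :: M) (j + 1) = c.length + pvOff M j := by
  simp [pvOff, List.take_succ_cons]

theorem drop_flatten_off (L : List (List Char)) (j : Nat) :
    L.flatten.drop (pvOff L j) = (L.drop j).flatten := by
  conv_lhs => rw [← List.take_append_drop j L]
  rw [List.flatten_append, List.drop_append]
  simp [pvOff]

theorem flatten_drop_cons (L : List (List Char)) (i : Nat) (hi : i < L.length) :
    (L.drop i).flatten = L[i] ++ (L.drop (i + 1)).flatten := by
  have h1 : L.drop i = L[i] :: L.drop (i + 1) := List.drop_eq_getElem_cons hi
  rw [h1, List.flatten_cons]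

theorem pvClamp_cast (v : Int) (m : Nat) :
    pvClamp v (m : Int) = ((PySem.List.clampIdx m v : Nat) : Int) := by
  simp only [pvClamp, PySem.List.clampIdx]
  split_ifs <;> omega

-- the characterization of Source B's offset table
theorem offs_foldl (ts : List String) : ∀ (acc : List Int),
    List.foldl (fun offs t => offs ++ [PySem.List.pyGetD offs (-1) 0 + PySem.Str.len t]) acc ts
    = acc ++ (List.range ts.length).map
        (fun j => PySem.List.pyGetD acc (-1) 0 + ((pvOff (ts.map String.toList) (j + 1) : Nat) : Int)) := by
  induction ts with
  | nil => intro acc; simp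
  | cons t ts ih =>
    intro acc
    simp only [List.foldl_cons]
    rw [ih]
    have hlast : PySem.List.pyGetD (acc ++ [PySem.List.pyGetD acc (-1) 0 + PySem.Str.len t]) (-1) 0
        = PySem.List.pyGetD acc (-1) 0 + PySem.Str.len t := by
      simp [PySem.List.pyGetD, PySem.List.pyGet?, PySem.List.pyIdx?]
    rw [hlast, List.length_cons, List.range_succ_eq_map, List.map_cons, List.map_map,
        List.append_assoc]
    congr 1
    rw [List.singleton_append]
    congr 1
    · simp [pvOff, PySem.Str.len_eq]
    · refine List.map_congr_left fun j _ => ?_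
      simp only [Function.comp, List.map_cons]
      rw [pvOff_cons_succ]
      simp [PySem.Str.len_eq]
      ring

theorem offs_eq (texts : List String) :
    List.foldl (fun offs t => offs ++ [PySem.List.pyGetD offs (-1) 0 + PySem.Str.len t]) [(0 : Int)] texts
    = (List.range (texts.length + 1)).map
        (fun j => ((pvOff (texts.map String.toList) j : Nat) : Int)) := by
  rw [offs_foldl]
  have h0 : PySem.List.pyGetD [(0 : Int)] (-1) 0 = 0 := by rfl
  simp only [h0, Int.zero_add]
  rw [List.range_succ_eq_map, List.map_cons, List.map_map]
  simp [pvOff_zero, Function.comp]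

-- the crux: one slice of the flattened list is prefix-overlap ++ chunk ++ suffix-overlap
theorem slice_flatten (L : List (List Char)) (i : Nat) (hi : i < L.length) (c1 c2 : Nat)
    (hc1 : c1 ≤ (L.getD (i - 1) []).length) (hc2 : c2 ≤ (L.getD (i + 1) []).length)
    (hc2' : i + 1 = L.length → c2 = 0) :
    (L.flatten.drop (if 0 < i then pvOff L (i - 1) + c1 else 0)).take
        (pvOff L (i + 1) + c2 - (if 0 < i then pvOff L (i - 1) + c1 else 0))
    = (if 0 < i then (L.getD (i - 1) []).drop c1 else []) ++ L.getD i []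
        ++ (if i + 1 < L.length then (L.getD (i + 1) []).take c2 else []) := by
  have hC : L.getD i [] = L[i] := List.getD_eq_getElem L [] hi
  have hsuf : (L.drop (i + 1)).flatten.take c2
      = (if i + 1 < L.length then (L.getD (i + 1) []).take c2 else []) := by
    by_cases hn : i + 1 < L.length
    · have hN : L.getD (i + 1) [] = L[i + 1] := List.getD_eq_getElem L [] hn
      rw [if_pos hn, flatten_drop_cons L (i + 1) hn, List.take_append, hN,
          Nat.sub_eq_zero_of_le (hN ▸ hc2), List.take_zero, List.append_nil]
    · have hd : L.drop (i + 1) = [] := List.drop_eq_nil_of_le (by omega)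
      rw [if_neg hn, hd]
      simp
  by_cases h0 : 0 < i
  · have hi1 : i - 1 < L.length := by omega
    have hP : L.getD (i - 1) [] = L[i - 1] := List.getD_eq_getElem L [] hi1
    have hoffi : pvOff L i = pvOff L (i - 1) + L[i - 1].length := by
      have h := pvOff_succ L (i - 1) hi1
      have he : i - 1 + 1 = i := by omega
      rwa [he] at h
    have hoffi1 : pvOff L (i + 1) = pvOff L i + L[i].length := pvOff_succ L i hi
    have hc1' : c1 ≤ L[i - 1].length := hP ▸ hc1
    rw [if_pos h0]
    rw [← List.drop_drop, drop_flatten_off]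
    have hmid : (L.drop (i - 1)).flatten = L[i - 1] ++ (L.drop i).flatten := by
      have h := flatten_drop_cons L (i - 1) hi1
      have he : i - 1 + 1 = i := by omega
      rwa [he] at h
    rw [hmid, List.drop_append, Nat.sub_eq_zero_of_le hc1', List.drop_zero,
        flatten_drop_cons L i hi, List.take_append, List.take_append]
    rw [List.length_drop]
    rw [show pvOff L (i + 1) + c2 - (pvOff L (i - 1) + c1)
        = (L[i - 1].length - c1) + (L[i].length + c2) from by omega]
    rw [List.take_of_length_le (by rw [List.length_drop]; omega)]
    rw [show L[i - 1].length - c1 + (L[i].length + c2) - (L[i - 1].length - c1)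
        = L[i].length + c2 from by omega]
    rw [List.take_of_length_le (by omega),
        show L[i].length + c2 - L[i].length = c2 from by omega, hsuf, hP, hC,
        if_pos h0, List.append_assoc]
  · have hiz : i = 0 := by omega
    subst hiz
    rw [if_neg h0, Nat.sub_zero, List.drop_zero]
    have hmid : L.flatten = L[0] ++ (L.drop 1).flatten := by
      have h := flatten_drop_cons L 0 hi
      simpa using h
    have hoff1 : pvOff L 1 = L[0].length := by
      have h := pvOff_succ L 0 hi
      simpa [pvOff_zero] using h
    rw [hmid, List.take_append, hoff1,
        List.take_of_length_le (by omega),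
        show L[0].length + c2 - L[0].length = c2 from by omega, hsuf, hC]
    simp


-- Python's xs[:b] at list level, for an arbitrary (possibly negative) bound b
theorem slice_none_some {α : Type} (xs : List α) (b : Int) :
    PySem.List.slice xs none (some b) = xs.take (PySem.List.clampIdx xs.length b) := by
  simp [PySem.List.slice]

-- one output element of B equals the canonical chunk
theorem elem_eq (texts : List String) (k : Int) (i : Nat) (hmem : i < texts.length) :
    PySem.Str.slice (PySem.Str.join "" texts)
      (some (if 0 < (i : Int) then
          PySem.List.pyGetD (List.map (fun j => ((pvOff (List.map String.toList texts) j : Nat) : Int))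
              (List.range (texts.length + 1))) ((i : Int) - 1) 0
            + pvClamp (-k) (PySem.Str.len (PySem.List.pyGetD texts ((i : Int) - 1) ""))
        else
          PySem.List.pyGetD (List.map (fun j => ((pvOff (List.map String.toList texts) j : Nat) : Int))
              (List.range (texts.length + 1))) (i : Int) 0))
      (some (if (i : Int) < (texts.length : Int) - 1 then
          PySem.List.pyGetD (List.map (fun j => ((pvOff (List.map String.toList texts) j : Nat) : Int))
              (List.range (texts.length + 1))) ((i : Int) + 1) 0
            + pvClamp k (PySem.Str.len (PySem.List.pyGetD texts ((i : Int) + 1) ""))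
        else
          PySem.List.pyGetD (List.map (fun j => ((pvOff (List.map String.toList texts) j : Nat) : Int))
              (List.range (texts.length + 1))) ((i : Int) + 1) 0))
    = pvChunk texts k i := by
  have hi' : i < (List.map String.toList texts).length := by simpa using hmem
  have hs : (PySem.Str.join "" texts).toList = (List.map String.toList texts).flatten := by
    rw [PySem.Str.toList_join]
    simp [join_empty_flatten]
  have hM : ∀ j : Nat, j ≤ texts.length →
      PySem.List.pyGetD (List.map (fun j => ((pvOff (List.map String.toList texts) j : Nat) : Int))
        (List.range (texts.length + 1))) (j : Int) 0 = ((pvOff (List.map String.toList texts) j : Nat) : Int) := by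
    intro j hj
    rw [PySem.List.pyGetD_natCast,
        List.getD_eq_getElem _ _ (by simpa using Nat.lt_succ_of_le hj)]
    simp
  have htext : ∀ (j : Nat) (hj : j < texts.length), PySem.List.pyGetD texts (j : Int) "" = texts[j] := by
    intro j hj
    rw [PySem.List.pyGetD_natCast, List.getD_eq_getElem _ _ hj]
  have hgd : ∀ (j : Nat) (hj : j < texts.length),
      (List.map String.toList texts).getD j [] = texts[j].toList := by
    intro j hj
    rw [List.getD_eq_getElem _ _ (by simpa using hj), List.getElem_map]
  by_cases h0 : 0 < i <;> by_cases h1 : i + 1 < texts.length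
  · -- interior chunk: both a previous and a next neighbor
    have e1 : (0 : Int) < (i : Int) := by omega
    have e2 : (i : Int) < (texts.length : Int) - 1 := by omega
    have c1 : (i : Int) - 1 = ((i - 1 : Nat) : Int) := by omega
    have c2 : (i : Int) + 1 = ((i + 1 : Nat) : Int) := by omega
    rw [if_pos e1, if_pos e2, c1, c2, hM (i - 1) (by omega), hM (i + 1) (by omega),
        htext (i - 1) (by omega), htext (i + 1) (by omega),
        PySem.Str.len_eq, PySem.Str.len_eq, pvClamp_cast, pvClamp_cast,
        ← Nat.cast_add, ← Nat.cast_add, ← String.toList_inj, PySem.Str.toList_slice]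
    simp only [PySem.Chars.slice_eq_listSlice]
    rw [hs, PySem.List.slice_natCast]
    have key := slice_flatten (List.map String.toList texts) i hi'
      (PySem.List.clampIdx texts[i - 1].toList.length (-k))
      (PySem.List.clampIdx texts[i + 1].toList.length k)
      (by rw [hgd (i - 1) (by omega)]; exact PySem.List.clampIdx_le _ _)
      (by rw [hgd (i + 1) (by omega)]; exact PySem.List.clampIdx_le _ _)
      (by intro h; simp at h; omega)
    rw [if_pos h0, if_pos (show i + 1 < (List.map String.toList texts).length by simpa using h1),
        hgd (i - 1) (by omega), hgd i hmem, hgd (i + 1) (by omega)] at key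
    rw [key]
    unfold pvChunk
    rw [if_pos e1, if_pos e2, c1, c2, htext (i - 1) (by omega), htext i hmem,
        htext (i + 1) (by omega)]
    simp only [String.toList_append, PySem.Str.toList_slice, PySem.Chars.slice_eq_listSlice,
        PySem.List.slice_some_none, slice_none_some]
    rw [if_pos h0]
  · -- last chunk with a previous neighbor
    have e1 : (0 : Int) < (i : Int) := by omega
    have e2 : ¬((i : Int) < (texts.length : Int) - 1) := by omega
    have c1 : (i : Int) - 1 = ((i - 1 : Nat) : Int) := by omega
    have c2 : (i : Int) + 1 = ((i + 1 : Nat) : Int) := by omega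
    rw [if_pos e1, if_neg e2, c1, c2, hM (i - 1) (by omega), hM (i + 1) (by omega),
        htext (i - 1) (by omega),
        PySem.Str.len_eq, pvClamp_cast,
        ← Nat.cast_add, ← String.toList_inj, PySem.Str.toList_slice]
    simp only [PySem.Chars.slice_eq_listSlice]
    rw [hs, PySem.List.slice_natCast]
    have key := slice_flatten (List.map String.toList texts) i hi'
      (PySem.List.clampIdx texts[i - 1].toList.length (-k)) 0
      (by rw [hgd (i - 1) (by omega)]; exact PySem.List.clampIdx_le _ _)
      (by omega) (by intro h; simp at h; omega)
    rw [if_pos h0, if_neg (show ¬ i + 1 < (List.map String.toList texts).length by simpa using h1),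
        hgd (i - 1) (by omega), hgd i hmem,
        Nat.add_zero, List.append_nil] at key
    rw [key]
    unfold pvChunk
    rw [if_pos e1, if_neg e2, c1, htext (i - 1) (by omega), htext i hmem]
    simp only [String.toList_append, PySem.Str.toList_slice, PySem.Chars.slice_eq_listSlice,
        PySem.List.slice_some_none]
    rw [if_pos h0]
    simp
  · -- first chunk with a next neighbor
    have hiz : i = 0 := by omega
    subst hiz
    have e1 : ¬((0 : Int) < ((0 : Nat) : Int)) := by omega
    have e2 : ((0 : Nat) : Int) < (texts.length : Int) - 1 := by omega
    have c2 : ((0 : Nat) : Int) + 1 = ((0 + 1 : Nat) : Int) := by omega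
    rw [if_neg e1, if_pos e2, c2, hM 0 (by omega), hM (0 + 1) (by omega),
        htext (0 + 1) (by omega),
        PySem.Str.len_eq, pvClamp_cast,
        ← Nat.cast_add, ← String.toList_inj, PySem.Str.toList_slice]
    simp only [PySem.Chars.slice_eq_listSlice]
    rw [hs, pvOff_zero, PySem.List.slice_natCast]
    have key := slice_flatten (List.map String.toList texts) 0 hi' 0
      (PySem.List.clampIdx texts[0 + 1].toList.length k)
      (by omega)
      (by rw [hgd (0 + 1) (by omega)]; exact PySem.List.clampIdx_le _ _)
      (by intro h; simp at h; omega)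
    rw [if_neg h0, if_pos (show 0 + 1 < (List.map String.toList texts).length by simpa using h1),
        hgd 0 hmem, hgd (0 + 1) (by omega)] at key
    rw [key]
    unfold pvChunk
    rw [if_neg e1, if_pos e2, c2, htext 0 hmem, htext (0 + 1) (by omega)]
    simp only [String.toList_append, PySem.Str.toList_slice, PySem.Chars.slice_eq_listSlice,
        slice_none_some]
    simp
  · -- a single chunk: no neighbors
    have hiz : i = 0 := by omega
    subst hiz
    have e1 : ¬((0 : Int) < ((0 : Nat) : Int)) := by omega
    have e2 : ¬(((0 : Nat) : Int) < (texts.length : Int) - 1) := by omega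
    have c2 : ((0 : Nat) : Int) + 1 = ((0 + 1 : Nat) : Int) := by omega
    rw [if_neg e1, if_neg e2, c2, hM 0 (by omega), hM (0 + 1) (by omega),
        ← String.toList_inj, PySem.Str.toList_slice]
    simp only [PySem.Chars.slice_eq_listSlice]
    rw [hs, pvOff_zero, PySem.List.slice_natCast]
    have key := slice_flatten (List.map String.toList texts) 0 hi' 0 0
      (by omega) (by omega) (by intro h; simp at h; omega)
    rw [if_neg h0, if_neg (show ¬ 0 + 1 < (List.map String.toList texts).length by simpa using h1),
        hgd 0 hmem, Nat.add_zero, List.append_nil] at key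
    rw [key]
    unfold pvChunk
    rw [if_neg e1, if_neg e2, htext 0 hmem]
    simp

theorem alt_eq_map (texts : List String) (k : Int) :
    create_overlapping_chunks_alt texts k = (List.range texts.length).map (pvChunk texts k) := by
  simp only [create_overlapping_chunks_alt]
  rw [offs_eq, PySem.List.foldl_append_singleton_eq_map, PySem.List.pyRange_one]
  simp only [List.nil_append, Int.sub_zero, Int.toNat_natCast, List.map_map]
  refine List.map_congr_left fun i hmem => ?_
  rw [List.mem_range] at hmem
  simpa using elem_eq texts k i hmem

-- ===== VERDICT (by name: the statement is the Claim_ definition above) =====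
theorem create_overlapping_chunks_spec : Claim_equal_create_overlapping_chunks := by
  intro texts k _
  unfold Spec_create_overlapping_chunks
  rw [a_eq_map, alt_eq_map]
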